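-- pv_equiv track=rewrite | github.com/yuuyeah/sample-auto-extract-ai-ocr-app | lambda/api/app/repositories/image_repository.py | determine_parent_status
-- ===== SOURCE A (Python) =====
-- def determine_parent_status(children):
--     """
--     子ページのステータスから親ドキュメントのステータスを判定する
--
--     Args:
--         children (list): 子ページのリスト
--
--     Returns:
--         str: 親ドキュメントのステータス
--     """
--     if not children:
--         return "converting"
--
--     statuses = [child.get("status") for child in children]
--
--     if all(status == "completed" for status in statuses):
--         return "completed"
--     elif any(status == "failed" for status in statuses):
--         return "failed"  # 一つでも失敗したら親も失敗
--     elif any(status == "processing" for status in statuses):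
--         return "processing"
--     else:
--         return "converting"  # pending状態
-- ===== SOURCE B (Python) =====
-- _RANK = {"failed": 3, "processing": 2, "completed": 0}
-- _PARENT = ["completed", "converting", "processing", "failed"]
--
-- def determine_parent_status(children):
--     if not children:
--         return "converting"
--     worst = 0
--     for child in children:
--         worst = max(worst, _RANK.get(child.get("status"), 1))
--     return _PARENT[worst]
-- ===== Notes on version B (the rewrite author's own statement) =====
-- stated objective: alternative
-- what changed: Replaces the statuses list and three priority all/any scans with a single max-fold over a severity ranking (completed=0, pending/other=1, processing=2, failed=3) followed by an indexed-table lookup of the parent status.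
import Mathlib
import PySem

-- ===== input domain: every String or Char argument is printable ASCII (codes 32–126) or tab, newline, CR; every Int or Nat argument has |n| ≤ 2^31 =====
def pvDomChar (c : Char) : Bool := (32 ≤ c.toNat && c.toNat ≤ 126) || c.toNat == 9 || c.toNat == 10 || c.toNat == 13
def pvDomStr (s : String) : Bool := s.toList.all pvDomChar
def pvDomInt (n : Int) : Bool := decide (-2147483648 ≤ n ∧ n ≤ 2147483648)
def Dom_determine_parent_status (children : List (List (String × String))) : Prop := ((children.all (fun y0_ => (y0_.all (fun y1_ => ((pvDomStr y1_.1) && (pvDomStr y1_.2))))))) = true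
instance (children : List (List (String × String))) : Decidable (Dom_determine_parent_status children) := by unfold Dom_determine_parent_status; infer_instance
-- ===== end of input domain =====

-- B replaces A's statuses list and three priority all/any scans with one max-fold over a
-- severity ranking of the child statuses, then a table lookup by the worst rank (alternative).


-- ===== PORT A =====
def determine_parent_status (children : List (List (String × String))) : String :=
  if children = [] then "converting"
  else
    let statuses := children.map (fun child => (PySem.Dict.ofList child).get? "status")
    if statuses.all (fun status => status == some "completed") then "completed"
    else if statuses.any (fun status => status == some "failed") then "failed"
    else if statuses.any (fun status => status == some "processing") then "processing"
    else "converting"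

-- ===== PORT B =====
-- _RANK.get(st, 1): st is child.get("status"), an Option String; None is never a key of the
-- string-keyed _RANK dict, so .get returns the default 1 — ported as the none branch.
def pvRankB (st : Option String) : Int :=
  match st with
  | some s => (PySem.Dict.ofList [("failed", (3 : Int)), ("processing", 2), ("completed", 0)]).getD s 1
  | none => 1

def pvParentB : List String := ["completed", "converting", "processing", "failed"]

def determine_parent_status_alt (children : List (List (String × String))) : String :=
  if children = [] then "converting"
  else
    let worst := children.foldl
      (fun w child => max w (pvRankB ((PySem.Dict.ofList child).get? "status"))) 0
    -- worst is provably in [0,3], so the list index never raises; getD "" is unreachable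
    (PySem.List.pyGet? pvParentB worst).getD ""

-- ===== PRECONDITION & SPEC =====
def Spec_determine_parent_status (children : List (List (String × String))) (out : String) : Prop := out = determine_parent_status_alt children
instance (children : List (List (String × String))) (out : String) : Decidable (Spec_determine_parent_status children out) := by unfold Spec_determine_parent_status; infer_instance

-- ===== CLAIM (what is proved, stated in full; the proofs are below) =====
def Claim_equal_determine_parent_status : Prop := ∀ (children : List (List (String × String))), Dom_determine_parent_status children → Spec_determine_parent_status children (determine_parent_status children)

-- ===== LEMMAS AND PROOFS =====

-- the rank function, characterised by cases on the status value
theorem pvRankB_eq (st : Option String) :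
    pvRankB st = if st = some "failed" then 3 else if st = some "processing" then 2
      else if st = some "completed" then 0 else 1 := by
  match st with
  | none => simp [pvRankB]
  | some s =>
    simp only [pvRankB, Option.some.injEq]
    by_cases h1 : s = "failed"
    · subst h1; decide
    · by_cases h2 : s = "processing"
      · subst h2; simp [h1]; decide
      · by_cases h3 : s = "completed"
        · subst h3; simp [h1, h2]; decide
        · have hd : (PySem.Dict.ofList [("failed", (3 : Int)), ("processing", 2), ("completed", 0)])
              = PySem.Dict.mk [("failed", 3), ("processing", 2), ("completed", 0)] := by decide
          rw [hd]
          simp [PySem.Dict.getD_eq_get?_getD, PySem.Dict.get?,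
            h1, h2, h3, Ne.symm h1, Ne.symm h2, Ne.symm h3]

-- bounds and membership facts about the max-fold
theorem foldMax_ge_init (rs : List Int) (w : Int) : w ≤ rs.foldl max w := by
  induction rs generalizing w with
  | nil => simp
  | cons r rs ih => exact le_trans (le_max_left w r) (ih (max w r))

theorem foldMax_ge_mem (rs : List Int) (r : Int) (h : r ∈ rs) :
    ∀ w, r ≤ rs.foldl max w := by
  induction h with
  | head xs => exact fun w => le_trans (le_max_right w r) (foldMax_ge_init xs (max w r))
  | tail x _ ih => exact fun w => ih (max w x)

theorem foldMax_eq_init_or_mem (rs : List Int) (w : Int) :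
    rs.foldl max w = w ∨ rs.foldl max w ∈ rs := by
  induction rs generalizing w with
  | nil => left; rfl
  | cons x xs ih =>
    rcases ih (max w x) with h | h
    · rcases max_choice w x with he | he
      · left
        show List.foldl max (max w x) xs = w
        rw [he] at h; rw [he]; exact h
      · right
        show List.foldl max (max w x) xs ∈ x :: xs
        rw [h, he]; exact List.mem_cons_self
    · right; exact List.mem_cons_of_mem _ h

-- ===== VERDICT (by name: the statement is the Claim_ definition above) =====
theorem determine_parent_status_spec : Claim_equal_determine_parent_status := by
  intro children _
  unfold Spec_determine_parent_status determine_parent_status determine_parent_status_alt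
  by_cases hnil : children = []
  · simp [hnil]
  · simp only [hnil, if_false]
    set sts := children.map (fun child => (PySem.Dict.ofList child).get? "status") with hsts
    have hfold : children.foldl
        (fun w child => max w (pvRankB ((PySem.Dict.ofList child).get? "status"))) 0
        = (sts.map pvRankB).foldl max 0 := by
      simp [hsts, List.foldl_map]
    rw [hfold]
    set rs := sts.map pvRankB with hrs
    set worst := rs.foldl max 0 with hw
    by_cases hall : sts.all (fun status => status == some "completed") = true
    · -- every rank is 0, so worst = 0
      have hzero : ∀ r ∈ rs, r = 0 := by
        intro r hr
        rw [hrs] at hr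
        obtain ⟨st, hst, hrank⟩ := List.mem_map.mp hr
        have := (List.all_eq_true.mp hall) st hst
        have hc : st = some "completed" := beq_iff_eq.mp this
        rw [← hrank, pvRankB_eq, hc]; simp
      have hw0 : worst = 0 := by
        rcases foldMax_eq_init_or_mem rs 0 with h | h
        · rw [hw]; exact h
        · rw [hw]; exact hzero _ (hw ▸ h)
      rw [hw0]
      simp only [hall, if_true]
      decide
    · -- some status ≠ completed, so worst ≥ 1
      have hge1 : 1 ≤ worst := by
        simp only [List.all_eq_true, not_forall] at hall
        obtain ⟨st, hst, hne⟩ := hall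
        have hmem : pvRankB st ∈ rs := by rw [hrs]; exact List.mem_map_of_mem hst
        have h1 : 1 ≤ pvRankB st := by
          have hne' : st ≠ some "completed" := fun h => hne (by simp [h])
          rw [pvRankB_eq]; split_ifs <;> omega
        rw [hw]; exact le_trans h1 (foldMax_ge_mem rs _ hmem 0)
      have hrepr : worst = 0 ∨ ∃ st ∈ sts, worst = pvRankB st := by
        rcases foldMax_eq_init_or_mem rs 0 with h | h
        · left; rw [hw]; exact h
        · right
          rw [hrs] at h
          obtain ⟨st, hst, hrank⟩ := List.mem_map.mp h
          exact ⟨st, hst, by rw [hw, hrs, ← hrank]⟩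
      have hle3 : worst ≤ 3 := by
        rcases hrepr with h | ⟨st, _, hws⟩
        · omega
        · rw [hws, pvRankB_eq]; split_ifs <;> omega
      simp only [hall]
      by_cases hfail : sts.any (fun status => status == some "failed") = true
      · -- some rank is 3, so worst = 3
        obtain ⟨st, hst, heq⟩ := List.any_eq_true.mp hfail
        have hc : st = some "failed" := beq_iff_eq.mp heq
        have hmem : pvRankB st ∈ rs := by rw [hrs]; exact List.mem_map_of_mem hst
        have h3 : pvRankB st = 3 := by rw [pvRankB_eq, hc]; simp
        have hw3 : worst = 3 := by
          refine le_antisymm hle3 ?_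
          rw [hw]; exact h3 ▸ foldMax_ge_mem rs _ hmem 0
        rw [hw3]
        simp only [hfail, if_true]
        decide
      · -- no failed: every rank ≤ 2
        have hle2 : worst ≤ 2 := by
          rcases hrepr with h | ⟨st, hst, hws⟩
          · omega
          · have hne : st ≠ some "failed" := by
              intro hc
              exact hfail (List.any_eq_true.mpr ⟨st, hst, by simp [hc]⟩)
            rw [hws, pvRankB_eq]
            split_ifs with a b c <;> first | exact absurd a hne | omega
        simp only [hfail]
        by_cases hproc : sts.any (fun status => status == some "processing") = true
        · obtain ⟨st, hst, heq⟩ := List.any_eq_true.mp hproc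
          have hc : st = some "processing" := beq_iff_eq.mp heq
          have hmem : pvRankB st ∈ rs := by rw [hrs]; exact List.mem_map_of_mem hst
          have h2 : pvRankB st = 2 := by rw [pvRankB_eq, hc]; simp
          have hw2 : worst = 2 := by
            refine le_antisymm hle2 ?_
            rw [hw]; exact h2 ▸ foldMax_ge_mem rs _ hmem 0
          rw [hw2]
          simp only [hproc, if_true]
          decide
        · -- no failed, no processing, not all completed: worst = 1
          have hle1 : worst ≤ 1 := by
            rcases hrepr with h | ⟨st, hst, hws⟩
            · omega
            · have hnf : st ≠ some "failed" := by
                intro hc; exact hfail (List.any_eq_true.mpr ⟨st, hst, by simp [hc]⟩)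
              have hnp : st ≠ some "processing" := by
                intro hc; exact hproc (List.any_eq_true.mpr ⟨st, hst, by simp [hc]⟩)
              rw [hws, pvRankB_eq]
              split_ifs with a b <;>
                first | exact absurd a hnf | exact absurd b hnp | omega
          have hw1 : worst = 1 := le_antisymm hle1 hge1
          rw [hw1]
          simp only [hproc]
          decide
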